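-- pv_equiv track=rewrite | github.com/yiyinghsieh/codewars | more_zeros_than_ones.py | more_zeros
-- ===== SOURCE A (Python) =====
-- def _new_s(s):
--     s_lst = []
--     length = len(s)
--     for i in range(length):
--         if s[i] not in s_lst:
--             s_lst.append(s[i])
--     return s_lst
--
-- def _ascii_value(s):
--     s_ascii_value = []
--     for x in _new_s(s):
--         ascii_value = ord(x)
--         s_ascii_value.append(ascii_value)
--     return s_ascii_value
--
-- def _binary(s):
--     binary_lst = []
--     for i in _ascii_value(s):
--         binary = bin(i)[2:]
--         binary_lst.append(binary)
--     return binary_lst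
--
-- def _count_1_0_True_False(s):
--     lst = []
--     binary_s = _binary(s)
--     length = len(binary_s)
--     num = 0
--     while num < length:
--         count_1 = 0
--         count_0 = 0
--         for i in binary_s[num]:
--             if int(i) == 1:
--                 count_1 += 1
--             else:
--                 count_0 += 1
--         if count_1 < count_0:
--             lst.append('True')
--         else:
--             lst.append('False')
--         num += 1
--     return lst
--
-- def more_zeros(s):
--     lst = _count_1_0_True_False(s)
--     length = len(lst)
--     new_s = _new_s(s)
--     result = []
--     for i in range(length):
--         if lst[i] == 'True':
--             result.append(new_s[i])
--     return result
-- ===== SOURCE B (Python) =====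
-- def more_zeros(s):
--     seen = set()
--     result = []
--     for c in s:
--         if c not in seen:
--             seen.add(c)
--             b = bin(ord(c))[2:]
--             if b.count('0') > b.count('1'):
--                 result.append(c)
--     return result
-- ===== Notes on version B (the rewrite author's own statement) =====
-- stated objective: simpler
-- what changed: A's four sequential passes (dedup list, ascii list, binary-string list, and a parallel 'True'/'False' flag list re-indexed against the dedup list) are replaced by ONE loop over s with a seen-set and a result accumulator that computes and tests each character's binary inline; O(1) set membership replaces A's O(k) list membership per char.
import Mathlib
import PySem

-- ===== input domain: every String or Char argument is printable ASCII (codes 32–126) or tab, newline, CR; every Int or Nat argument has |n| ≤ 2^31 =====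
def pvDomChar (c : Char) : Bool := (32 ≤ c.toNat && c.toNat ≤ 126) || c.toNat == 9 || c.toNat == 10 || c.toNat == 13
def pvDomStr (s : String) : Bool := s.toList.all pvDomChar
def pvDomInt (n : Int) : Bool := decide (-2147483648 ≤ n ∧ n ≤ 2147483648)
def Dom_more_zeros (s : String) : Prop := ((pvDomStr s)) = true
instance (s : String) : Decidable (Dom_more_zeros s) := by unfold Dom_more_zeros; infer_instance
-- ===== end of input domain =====

-- B replaces A's four sequential passes (dedup list, ascii list, binary list, parallel
-- 'True'/'False' flag list indexed against the dedup list) by one direct accumulator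
-- pass with a seen-set; objective: simpler.

-- ===== PORT A =====
-- port of Python's builtin bin(n)[2:] (binary digits, MSB first; bin(0)[2:] would be "0"):
-- exact by the usual repeated-division characterisation of binary notation
def pvBinDigits : Nat → List Char
  | 0 => []
  | n+1 => pvBinDigits ((n+1)/2) ++ [if (n+1) % 2 = 1 then '1' else '0']
decreasing_by omega

def pvBin (n : Nat) : List Char := if n = 0 then ['0'] else pvBinDigits n

-- _new_s: loop over s appending unseen chars (Python's 1-char strings kept as Char)
def pvNewS : List Char → List Char → List Char
  | [], acc => acc
  | c :: rest, acc => pvNewS rest (if acc.contains c then acc else acc ++ [c])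

-- _ascii_value / _binary: one appending loop each = map
def pvAsciiValue (l : List Char) : List Nat := l.map (fun x => x.toNat)
def pvBinary (l : List Nat) : List (List Char) := l.map (fun i => pvBin i)

-- inner for-loop of _count_1_0_True_False: (count_1, count_0)
def pvCnt : List Char → Nat × Nat → Nat × Nat
  | [], p => p
  | c :: rest, p => pvCnt rest (if c == '1' then (p.1 + 1, p.2) else (p.1, p.2 + 1))

-- while-loop of _count_1_0_True_False over the binary list
def pvCountTF (bs : List (List Char)) : List String :=
  bs.map (fun b => if (pvCnt b (0, 0)).1 < (pvCnt b (0, 0)).2 then "True" else "False")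

-- final loop of more_zeros: walk lst and new_s (same length) in parallel by index
def pvFinal : List String → List Char → List String
  | t :: ts, c :: cs => (if t == "True" then [String.ofList [c]] else []) ++ pvFinal ts cs
  | _, _ => []

def more_zeros (s : String) : List String :=
  let new_s := pvNewS s.toList []
  pvFinal (pvCountTF (pvBinary (pvAsciiValue new_s))) new_s

-- ===== PORT B =====
-- single pass: seen set + result accumulator
def pvAltLoop : List Char → PySem.Set Char → List String → List String
  | [], _, res => res
  | c :: rest, seen, res =>
    if PySem.Set.contains seen c then pvAltLoop rest seen res
    else
      let b := pvBin c.toNat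
      pvAltLoop rest (PySem.Set.add seen c)
        (if b.count '0' > b.count '1' then res ++ [String.ofList [c]] else res)

def more_zeros_alt (s : String) : List String := pvAltLoop s.toList PySem.Set.empty []

-- ===== PRECONDITION & SPEC =====
def Spec_more_zeros (s : String) (out : List String) : Prop := out = more_zeros_alt s
instance (s : String) (out : List String) : Decidable (Spec_more_zeros s out) := by unfold Spec_more_zeros; infer_instance

-- ===== CLAIM (what is proved, stated in full; the proofs are below) =====
def Claim_equal_more_zeros : Prop := ∀ (s : String), Dom_more_zeros s → Spec_more_zeros s (more_zeros s)

-- ===== LEMMAS AND PROOFS =====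

-- reference function: one pass, A's predicate, Set.add-style seen list
def pvRef : List Char → List Char → List String
  | [], _ => []
  | c :: rest, seen =>
    if seen.contains c then pvRef rest seen
    else (if (pvCnt (pvBin c.toNat) (0, 0)).1 < (pvCnt (pvBin c.toNat) (0, 0)).2
            then [String.ofList [c]] else []) ++ pvRef rest (seen ++ [c])

def pvG (c : Char) : List String :=
  if (pvCnt (pvBin c.toNat) (0, 0)).1 < (pvCnt (pvBin c.toNat) (0, 0)).2
    then [String.ofList [c]] else []

def pvFg (l : List Char) : List String := l.flatMap pvG

theorem pvCnt_spec (b : List Char) (p : Nat × Nat) :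
    pvCnt b p = (p.1 + b.count '1', p.2 + b.countP (fun c => !(c == '1'))) := by
  induction b generalizing p with
  | nil => simp [pvCnt, List.count]
  | cons c rest ih =>
    by_cases h : c = '1' <;>
      simp [pvCnt, h, ih] <;> omega

theorem pvBinDigits_mem (n : Nat) : ∀ c ∈ pvBinDigits n, c = '0' ∨ c = '1' := by
  induction n using Nat.strong_induction_on with
  | _ n ih =>
    match n with
    | 0 => simp [pvBinDigits]
    | m+1 =>
      intro c hc
      rw [pvBinDigits] at hc
      rcases List.mem_append.1 hc with h | h
      · exact ih ((m+1)/2) (by omega) c h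
      · simp at h; split at h <;> simp [h]

theorem pvBin_mem (n : Nat) : ∀ c ∈ pvBin n, c = '0' ∨ c = '1' := by
  unfold pvBin; split
  · simp
  · exact pvBinDigits_mem n

theorem countP_ne_one (l : List Char) (h : ∀ c ∈ l, c = '0' ∨ c = '1') :
    l.countP (fun c => !(c == '1')) = l.count '0' := by
  induction l with
  | nil => rfl
  | cons c rest ih =>
    have hr := ih (fun x hx => h x (List.mem_cons_of_mem _ hx))
    rcases h c List.mem_cons_self with rfl | rfl <;>
      simp [hr]

-- B's test equals A's flag test
theorem pred_eq (c : Char) :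
    ((pvBin c.toNat).count '0' > (pvBin c.toNat).count '1')
      ↔ (pvCnt (pvBin c.toNat) (0, 0)).1 < (pvCnt (pvBin c.toNat) (0, 0)).2 := by
  rw [pvCnt_spec, countP_ne_one _ (pvBin_mem c.toNat)]
  simp

-- A's flag/final machinery collapses to pvFg
theorem pvFinal_map (l : List Char) :
    pvFinal (pvCountTF (pvBinary (pvAsciiValue l))) l = pvFg l := by
  induction l with
  | nil => rfl
  | cons c rest ih =>
    simp only [pvAsciiValue, pvBinary, pvCountTF, List.map_map, List.map_cons] at ih ⊢
    by_cases h : (pvCnt (pvBin c.toNat) (0, 0)).1 < (pvCnt (pvBin c.toNat) (0, 0)).2 <;>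
      simp [pvFinal, pvFg, pvG, h, ih]

theorem pvFg_append (l₁ l₂ : List Char) : pvFg (l₁ ++ l₂) = pvFg l₁ ++ pvFg l₂ := by
  simp [pvFg]

theorem A_ref (cs acc : List Char) : pvFg (pvNewS cs acc) = pvFg acc ++ pvRef cs acc := by
  induction cs generalizing acc with
  | nil => simp [pvNewS, pvRef]
  | cons c rest ih =>
    by_cases h : c ∈ acc
    · simp [pvNewS, pvRef, h, ih]
    · have hstep : pvNewS (c :: rest) acc = pvNewS rest (acc ++ [c]) := by
        simp [pvNewS, h]
      rw [hstep, ih (acc ++ [c]), pvFg_append, pvRef]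
      simp [pvFg, pvG, h, List.append_assoc]

theorem B_ref (cs : List Char) (seen : PySem.Set Char) (res : List String) :
    pvAltLoop cs seen res = res ++ pvRef cs seen := by
  induction cs generalizing seen res with
  | nil => simp [pvAltLoop, pvRef]
  | cons c rest ih =>
    by_cases h : c ∈ seen
    · simp [pvAltLoop, pvRef, PySem.Set.contains, h, ih]
    · by_cases hp : (pvBin c.toNat).count '0' > (pvBin c.toNat).count '1'
      · have hp' := (pred_eq c).1 hp
        simp [pvAltLoop, pvRef, PySem.Set.contains, h, hp, hp', ih]
      · have hp' : ¬ (pvCnt (pvBin c.toNat) (0, 0)).1 < (pvCnt (pvBin c.toNat) (0, 0)).2 :=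
          fun hx => hp ((pred_eq c).2 hx)
        simp [pvAltLoop, pvRef, PySem.Set.contains, h, hp, hp', ih]

-- ===== VERDICT (by name: the statement is the Claim_ definition above) =====
theorem more_zeros_spec : Claim_equal_more_zeros := by
  intro s _
  unfold Spec_more_zeros more_zeros more_zeros_alt
  rw [pvFinal_map, B_ref]
  have := A_ref s.toList []
  simpa [pvFg, PySem.Set.empty] using this
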